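-- pv_equiv track=rewrite | github.com/HeeJu-XiJu/Algorithm | programmers/level1/폰켓몬/sol.py | solution
-- ===== SOURCE A (Python) =====
-- def solution(nums):
--     N_2 = len(nums) // 2
--     stack = []
--     for i in nums:
--         if i not in stack:
--             stack.append(i)
--
--     answer = min(N_2, len(stack))
--     return answer
-- ===== SOURCE B (Python) =====
-- def solution(nums):
--     s = sorted(nums)
--     if not s:
--         distinct = 0
--     else:
--         distinct = 1 + sum(1 for a, b in zip(s, s[1:]) if a != b)
--     return min(len(nums) // 2, distinct)
-- ===== Notes on version B (the rewrite author's own statement) =====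
-- stated objective: faster
-- what changed: Replaces the quadratic build-a-list-with-membership-scans dedup by sort-then-adjacent-scan: distinct count is 1 plus the number of positions where a sorted copy changes value.
import Mathlib
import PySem

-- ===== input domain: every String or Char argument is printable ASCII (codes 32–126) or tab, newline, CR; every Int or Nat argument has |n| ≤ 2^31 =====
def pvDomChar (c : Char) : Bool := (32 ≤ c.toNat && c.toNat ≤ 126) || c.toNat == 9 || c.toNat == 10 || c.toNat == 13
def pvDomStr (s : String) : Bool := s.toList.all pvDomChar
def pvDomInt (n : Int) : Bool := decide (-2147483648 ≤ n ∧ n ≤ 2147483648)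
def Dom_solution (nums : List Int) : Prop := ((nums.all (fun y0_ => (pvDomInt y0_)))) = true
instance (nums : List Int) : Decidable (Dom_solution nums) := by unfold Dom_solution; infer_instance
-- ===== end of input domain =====

-- B replaces A's quadratic membership-scan dedup by sort + adjacent-difference scan (faster, O(n log n)).


-- ===== PORT A =====
def solution (nums : List Int) : Int :=
  let n2 := PySem.Int.floordiv (nums.length : Int) 2
  let stack := nums.foldl (fun st i => if i ∈ st then st else st ++ [i]) []
  min n2 (stack.length : Int)

-- ===== PORT B =====
def solution_alt (nums : List Int) : Int :=
  let s := PySem.List.sorted nums (fun x => x) false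
  let distinct : Int :=
    match s with
    | [] => 0
    | _ :: _ =>
        1 + (s.zip s.tail).foldl (fun acc p => if p.1 ≠ p.2 then acc + 1 else acc) 0
  min (PySem.Int.floordiv (nums.length : Int) 2) distinct

-- ===== PRECONDITION & SPEC =====
def Spec_solution (nums : List Int) (out : Int) : Prop := out = solution_alt nums
instance (nums : List Int) (out : Int) : Decidable (Spec_solution nums out) := by unfold Spec_solution; infer_instance

-- ===== CLAIM (what is proved, stated in full; the proofs are below) =====
def Claim_equal_solution : Prop := ∀ (nums : List Int), Dom_solution nums → Spec_solution nums (solution nums)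

-- ===== LEMMAS AND PROOFS =====

-- A's stack: nodup, and its elements are exactly st's ∪ nums'.
theorem pv_stack_spec (nums : List Int) :
    ∀ st : List Int, st.Nodup →
      (nums.foldl (fun st i => if i ∈ st then st else st ++ [i]) st).Nodup ∧
      (nums.foldl (fun st i => if i ∈ st then st else st ++ [i]) st).toFinset
        = st.toFinset ∪ nums.toFinset := by
  induction nums with
  | nil => intro st h; simp [h]
  | cons x t ih =>
      intro st h
      by_cases hx : x ∈ st
      · simp only [List.foldl_cons, if_pos hx]
        obtain ⟨h1, h2⟩ := ih st h
        refine ⟨h1, ?_⟩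
        rw [h2]
        ext a
        simp only [Finset.mem_union, List.mem_toFinset, List.toFinset_cons, Finset.mem_insert]
        constructor
        · tauto
        · rintro (h | rfl | h)
          · tauto
          · exact Or.inl hx
          · tauto
      · simp only [List.foldl_cons, if_neg hx]
        have hst : (st ++ [x]).Nodup := by
          simp only [List.nodup_append, List.nodup_singleton, List.mem_singleton]
          refine ⟨h, by simp, ?_⟩
          intro a ha b hb
          subst hb
          intro heq
          subst heq
          exact hx ha
        obtain ⟨h1, h2⟩ := ih _ hst
        refine ⟨h1, ?_⟩
        rw [h2]
        ext a
        simp only [Finset.mem_union, List.mem_toFinset, List.toFinset_cons, Finset.mem_insert,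
          List.mem_append, List.mem_singleton]
        tauto

-- the fold in B counts the adjacent unequal pairs
theorem pv_fold_count (l : List (Int × Int)) :
    ∀ a : Int, l.foldl (fun acc p => if p.1 ≠ p.2 then acc + 1 else acc) a
      = a + (l.countP (fun p => !decide (p.1 = p.2)) : Int) := by
  induction l with
  | nil => intro a; simp
  | cons p t ih =>
      intro a
      rw [List.foldl_cons, List.countP_cons]
      by_cases h : p.1 = p.2
      · rw [if_neg (fun hc => hc h), ih]
        simp [h]
      · rw [if_pos h, ih]
        simp [h]
        ring

-- on a ≤-sorted nonempty list, 1 + adjacent-change count = number of distinct values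
theorem pv_adj_distinct :
    ∀ (t : List Int) (x : Int), (x :: t).Pairwise (· ≤ ·) →
      1 + ((x :: t).zip t).countP (fun p => !decide (p.1 = p.2)) = (x :: t).toFinset.card := by
  intro t
  induction t with
  | nil => intro x _; simp
  | cons y t' ih =>
      intro x hp
      have hp' : (y :: t').Pairwise (· ≤ ·) := hp.of_cons
      have hxy : x ≤ y := (List.pairwise_cons.mp hp).1 y (by simp)
      have ihy := ih y hp'
      by_cases hxyeq : x = y
      · subst hxyeq
        have : ((x :: x :: t').zip (x :: t')).countP (fun p => !decide (p.1 = p.2))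
            = ((x :: t').zip t').countP (fun p => !decide (p.1 = p.2)) := by
          simp [List.zip]
        rw [this, ihy]
        simp
      · have hlt : x < y := lt_of_le_of_ne hxy hxyeq
        have hnotmem : x ∉ (y :: t').toFinset := by
          simp only [List.mem_toFinset, List.mem_cons]
          rintro (h | h)
          · exact hxyeq h
          · have : y ≤ x := (List.pairwise_cons.mp hp').1 x h
            omega
        have hcard : (x :: y :: t').toFinset.card = (y :: t').toFinset.card + 1 := by
          simp only [List.toFinset_cons (a := x)]
          rw [Finset.card_insert_of_notMem hnotmem]
        have : ((x :: y :: t').zip (y :: t')).countP (fun p => !decide (p.1 = p.2))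
            = 1 + ((y :: t').zip t').countP (fun p => !decide (p.1 = p.2)) := by
          simp [List.zip, hxyeq]
          omega
        rw [this, hcard]
        omega

-- ===== VERDICT (by name: the statement is the Claim_ definition above) =====
theorem solution_spec : Claim_equal_solution := by
  intro nums _
  unfold Spec_solution solution solution_alt
  simp only []
  obtain ⟨hnd, hset⟩ := pv_stack_spec nums [] List.nodup_nil
  have hlen : (nums.foldl (fun st i => if i ∈ st then st else st ++ [i]) []).length
      = nums.toFinset.card := by
    rw [← List.toFinset_card_of_nodup hnd, hset]; simp
  set s := PySem.List.sorted nums (fun x => x) false with hs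
  have hperm : s.Perm nums := PySem.List.sorted_perm nums (fun x => x) false
  have hsfin : s.toFinset = nums.toFinset := List.toFinset_eq_of_perm _ _ hperm
  have hpw : s.Pairwise (· ≤ ·) := by
    have := PySem.List.sorted_pairwise nums (fun x => x)
    simpa using this
  cases hse : s with
  | nil =>
      have : nums = [] := by
        have := hperm; rw [hse] at this; exact (List.Perm.nil_eq this).symm
      subst this
      simp
  | cons x t =>
      have hpw' : (x :: t).Pairwise (· ≤ ·) := by rw [← hse]; exact hpw
      have hadj := pv_adj_distinct t x hpw'
      rw [pv_fold_count]
      have hsfin' : (x :: t).toFinset = nums.toFinset := by rw [← hse]; exact hsfin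
      rw [hlen]
      have htail : (x :: t).tail = t := rfl
      rw [htail] at *
      rw [← hsfin', ← hadj]
      push_cast
      ring_nf
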